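-- pv_equiv track=rewrite | github.com/samodurOFF/phrase_grouping | grouping.py | get_group_name
-- ===== SOURCE A (Python) =====
-- def get_group_name(grouped_phrases):
--     """
--     Функция для генерации имени для группы
--
--     :param grouped_phrases:
--     :return:
--     """
--     all_words = []  # список, куда будут помещаться все слова всех фраз группы
--     for phrase in grouped_phrases:  # для каждой фразы из группы
--         all_words.extend(phrase.split(' '))  # разделить на слова и поместить в список
--
--     freq_dict = {}  # словарь, где ключи – слова, а значения – частоты их употребления во всех словах группы
--     all_words_uniq = sorted(set(all_words))  # уникальные слова всех фраз, отсортированные по убыванию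
--     for word in all_words_uniq:  # для каждой фразы в списке фраз
--         freq_dict[word] = all_words.count(word)  # записать в словарь частоту встречаемости этой фразы
--
--     sorted_words = sorted(freq_dict, key=freq_dict.get,
--                           reverse=True)  # список слов, значения которых упорядочены по убыванию
--
--     group_name = ' '.join([str(i) for i in sorted_words])  # объединение ключей в имя группы
--     return group_name
-- ===== SOURCE B (Python) =====
-- def get_group_name(grouped_phrases):
--     # Sort-then-group: sort the flattened word list once, run-length encode
--     # adjacent equal words into (word, count) runs (alphabetical order), then
--     # stable-sort the runs by count descending (ties stay alphabetical).
--     words = sorted(w for phrase in grouped_phrases for w in phrase.split(' '))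
--     runs = []
--     for w in words:
--         if runs and runs[-1][0] == w:
--             runs[-1] = (w, runs[-1][1] + 1)
--         else:
--             runs.append((w, 1))
--     runs.sort(key=lambda r: r[1], reverse=True)
--     return ' '.join(r[0] for r in runs)
-- ===== Notes on version B (the rewrite author's own statement) =====
-- stated objective: faster
-- what changed: Replaces A's dict of frequencies (sorted(set(words)) plus a list.count scan per unique word, then a key-sort of the dict) by a sort-then-group traversal: sort the flattened word list once, run-length encode adjacent equal words into (word, count) runs, then stable-sort the runs by count descending.
import Mathlib
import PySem

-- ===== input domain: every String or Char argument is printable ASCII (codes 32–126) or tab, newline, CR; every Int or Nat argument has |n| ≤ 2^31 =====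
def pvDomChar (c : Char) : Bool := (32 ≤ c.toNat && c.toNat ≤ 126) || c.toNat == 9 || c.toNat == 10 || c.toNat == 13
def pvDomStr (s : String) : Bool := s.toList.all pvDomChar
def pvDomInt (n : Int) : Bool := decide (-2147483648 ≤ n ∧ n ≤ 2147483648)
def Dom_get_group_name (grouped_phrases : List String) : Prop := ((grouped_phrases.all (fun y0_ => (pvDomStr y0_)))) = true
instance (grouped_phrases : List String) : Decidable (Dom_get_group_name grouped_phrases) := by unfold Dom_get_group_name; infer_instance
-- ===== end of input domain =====

-- B replaces A's dict-of-counts (built by per-unique-word list.count scans) and key-sort by a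
-- sort-then-group traversal: sort all words once, run-length encode adjacent equal words,
-- stable-sort the runs by count descending; same return value, measured faster.

-- ===== PORT A =====
-- phrase.split(' '): sep is the non-empty literal " ", so PySem.Str.split? is always `some`
-- and the `.getD []` default is never used.
def get_group_name (grouped_phrases : List String) : String :=
  let all_words := grouped_phrases.foldl
    (fun acc phrase => acc ++ (PySem.Str.split? phrase " ").getD []) []
  let all_words_uniq := PySem.List.sorted (PySem.Set.ofList all_words) (fun x => x) false
  let freq_dict := all_words_uniq.foldl
    (fun d word => d.insert word ((PySem.List.count all_words word : Int))) PySem.Dict.empty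
  -- key=freq_dict.get: every sorted element is a key of freq_dict, where .get returns the
  -- stored count; getD w 0 is exact there.
  let sorted_words := PySem.List.sorted freq_dict.keys (fun w => freq_dict.getD w 0) true
  -- str(i) on a str is the identity
  PySem.Str.join " " (sorted_words.map (fun i => i))

-- ===== PORT B =====
def get_group_name_alt (grouped_phrases : List String) : String :=
  let words := PySem.List.sorted
    (grouped_phrases.flatMap (fun phrase => (PySem.Str.split? phrase " ").getD []))
    (fun x => x) false
  -- the run-length loop: `runs[-1]` is the last element (getLast?), updating it is
  -- dropLast ++ [·], appending is ++ [·]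
  let runs := words.foldl (fun runs w =>
      match runs.getLast? with
      | some r => if r.1 == w then runs.dropLast ++ [(w, r.2 + 1)] else runs ++ [(w, (1 : Int))]
      | none => runs ++ [(w, (1 : Int))]) ([] : List (String × Int))
  let runs2 := PySem.List.sorted runs (fun r => r.2) true
  PySem.Str.join " " (runs2.map (fun r => r.1))

-- ===== PRECONDITION & SPEC =====
def Spec_get_group_name (grouped_phrases : List String) (out : String) : Prop := out = get_group_name_alt grouped_phrases
instance (grouped_phrases : List String) (out : String) : Decidable (Spec_get_group_name grouped_phrases out) := by unfold Spec_get_group_name; infer_instance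

-- ===== CLAIM (what is proved, stated in full; the proofs are below) =====
def Claim_equal_get_group_name : Prop := ∀ (grouped_phrases : List String), Dom_get_group_name grouped_phrases → Spec_get_group_name grouped_phrases (get_group_name grouped_phrases)

-- ===== LEMMAS AND PROOFS =====

-- the strict order "higher count first, tie-break by the input's strict order r"
def pvRel {α : Type} (key : α → Int) (r : α → α → Prop) (a b : α) : Prop :=
  key b < key a ∨ (key a = key b ∧ r a b)

lemma insA {α : Type} (key : α → Int) (r : α → α → Prop)
    (x : α) (acc : List α)
    (hacc : acc.Pairwise (pvRel key r))
    (hx : ∀ y ∈ acc, key x = key y → r y x) :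
    (PySem.List.insertBy (fun a b => decide (key b < key a)) x acc).Pairwise (pvRel key r) := by
  induction acc with
  | nil => simp [PySem.List.insertBy]
  | cons y ys ih =>
    rw [PySem.List.insertBy]
    by_cases h : key y < key x
    · simp only [h, decide_true, if_true]
      constructor
      · intro z hz
        rcases List.mem_cons.mp hz with rfl | hz
        · exact Or.inl h
        · rcases (List.pairwise_cons.mp hacc).1 z hz with h2 | ⟨h2, _⟩
          · exact Or.inl (lt_trans h2 h)
          · exact Or.inl (h2 ▸ h)
      · exact hacc
    · simp only [h, decide_false, Bool.false_eq_true, if_false]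
      constructor
      · intro z hz
        rcases (PySem.List.insertBy_mem_iff _ _ _ _).mp hz with rfl | hz
        · rcases lt_or_eq_of_le (not_lt.mp h) with h2 | h2
          · exact Or.inl h2
          · exact Or.inr ⟨h2.symm, hx y List.mem_cons_self h2⟩
        · exact (List.pairwise_cons.mp hacc).1 z hz
      · exact ih (List.pairwise_cons.mp hacc).2
          (fun z hz he => hx z (List.mem_cons_of_mem _ hz) he)

lemma foldA {α : Type} (key : α → Int) (r : α → α → Prop)
    (xs acc : List α)
    (hacc : acc.Pairwise (pvRel key r))
    (hsep : ∀ y ∈ acc, ∀ x ∈ xs, r y x)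
    (hxs : xs.Pairwise r) :
    (xs.foldl (fun acc x => PySem.List.insertBy (fun a b => decide (key b < key a)) x acc)
      acc).Pairwise (pvRel key r) := by
  induction xs generalizing acc with
  | nil => exact hacc
  | cons x t ih =>
    simp only [List.foldl_cons]
    apply ih
    · exact insA key r x acc hacc (fun y hy _ => hsep y hy x List.mem_cons_self)
    · intro y hy z hz
      rcases (PySem.List.insertBy_mem_iff _ _ _ _).mp hy with rfl | hy
      · exact (List.pairwise_cons.mp hxs).1 z hz
      · exact hsep y hy z (List.mem_cons_of_mem _ hz)
    · exact (List.pairwise_cons.mp hxs).2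

lemma sorted_rev_pairwise_rel {α : Type} (key : α → Int) (r : α → α → Prop)
    (xs : List α) (hxs : xs.Pairwise r) :
    (PySem.List.sorted xs key true).Pairwise (pvRel key r) := by
  rw [PySem.List.sorted_rev_eq_foldl_insertBy]
  exact foldA key r xs [] (by simp) (by simp) hxs

-- value of A's frequency dict on its own keys
lemma getD_foldl_insert_not_mem (l : List String) (f : String → Int)
    (d : PySem.Dict String Int) (v : String) (hv : v ∉ l) :
    (l.foldl (fun d w => d.insert w (f w)) d).getD v 0 = d.getD v 0 := by
  induction l generalizing d with
  | nil => rfl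
  | cons w t ih =>
    simp only [List.foldl_cons]
    rw [ih _ (fun h => hv (List.mem_cons_of_mem _ h)),
      PySem.Dict.getD_insert_of_ne _ _ _ (by rintro rfl; exact hv List.mem_cons_self)]

lemma getD_foldl_insert_mem (l : List String) (f : String → Int)
    (d : PySem.Dict String Int) (v : String) (hv : v ∈ l) :
    (l.foldl (fun d w => d.insert w (f w)) d).getD v 0 = f v := by
  induction l generalizing d with
  | nil => cases hv
  | cons w t ih =>
    simp only [List.foldl_cons]
    by_cases h : v ∈ t
    · exact ih _ h
    · rcases List.mem_cons.mp hv with rfl | h2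
      · rw [getD_foldl_insert_not_mem _ _ _ _ h, PySem.Dict.getD_insert_self]
      · exact absurd h2 h

-- proof-side recursion describing B's run-length loop (NOT used by the ports)
def pvRleAux : String → Int → List String → List (String × Int)
  | v, k, [] => [(v, k)]
  | v, k, w :: t => if v == w then pvRleAux v (k + 1) t else (v, k) :: pvRleAux w 1 t

lemma foldRuns (ws : List String) (pre : List (String × Int)) (v : String) (k : Int) :
    ws.foldl (fun runs w =>
      match runs.getLast? with
      | some r => if r.1 == w then runs.dropLast ++ [(w, r.2 + 1)] else runs ++ [(w, (1 : Int))]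
      | none => runs ++ [(w, (1 : Int))]) (pre ++ [(v, k)])
    = pre ++ pvRleAux v k ws := by
  induction ws generalizing pre v k with
  | nil => simp [pvRleAux]
  | cons w t ih =>
    simp only [List.foldl_cons, List.getLast?_concat, List.dropLast_concat, pvRleAux]
    by_cases h : v = w
    · subst h
      simp only [beq_self_eq_true, if_true]
      exact ih pre v (k + 1)
    · have hb : (v == w) = false := beq_eq_false_iff_ne.mpr h
      simp only [hb, Bool.false_eq_true, if_false, List.append_assoc]
      have := ih (pre ++ [(v, k)]) w 1
      simpa [List.append_assoc] using this

lemma rleAux_spec (ws : List String) (v : String) (k : Int)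
    (hsort : ws.Pairwise (· ≤ ·)) (hv : ∀ x ∈ ws, v ≤ x) :
    ((pvRleAux v k ws).map Prod.fst).Pairwise (· < ·) ∧
    (∀ a, a ∈ (pvRleAux v k ws).map Prod.fst ↔ a = v ∨ a ∈ ws) ∧
    (∀ p ∈ pvRleAux v k ws,
      p.2 = if p.1 = v then k + (PySem.List.count ws v : Int) else (PySem.List.count ws p.1 : Int)) := by
  induction ws generalizing v k with
  | nil =>
    refine ⟨by simp [pvRleAux], by simp [pvRleAux], ?_⟩
    intro p hp
    simp only [pvRleAux, List.mem_singleton] at hp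
    subst hp
    simp [PySem.List.count_eq]
  | cons w t ih =>
    have hwt : ∀ x ∈ t, w ≤ x := fun x hx => (List.pairwise_cons.mp hsort).1 x hx
    by_cases h : v = w
    · subst h
      have hIH := ih v (k + 1) (List.pairwise_cons.mp hsort).2 hwt
      simp only [pvRleAux, beq_self_eq_true, if_true]
      refine ⟨hIH.1, ?_, ?_⟩
      · intro a
        rw [hIH.2.1 a]
        constructor
        · rintro (rfl | ha)
          · exact Or.inl rfl
          · exact Or.inr (List.mem_cons_of_mem _ ha)
        · rintro (rfl | ha)
          · exact Or.inl rfl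
          · rcases List.mem_cons.mp ha with rfl | ha
            · exact Or.inl rfl
            · exact Or.inr ha
      · intro p hp
        have hcnt := hIH.2.2 p hp
        by_cases hpv : p.1 = v
        · rw [if_pos hpv] at hcnt
          rw [if_pos hpv]
          rw [hcnt, PySem.List.count_eq, PySem.List.count_eq, List.count_cons_self]
          push_cast
          ring
        · simp only [hpv, if_false] at hcnt ⊢
          have hne : p.1 ≠ v := fun he => hpv he
          rw [hcnt, PySem.List.count_eq, PySem.List.count_eq, List.count_cons_of_ne hne.symm]
    · -- v < w, and v is strictly below everything in w :: t
      have hvw : v < w := lt_of_le_of_ne (hv w List.mem_cons_self) h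
      have hvlt : ∀ x ∈ w :: t, v < x := by
        intro x hx
        rcases List.mem_cons.mp hx with rfl | hx
        · exact hvw
        · exact lt_of_lt_of_le hvw (hwt x hx)
      have hIH := ih w 1 (List.pairwise_cons.mp hsort).2 hwt
      have hb : (v == w) = false := beq_eq_false_iff_ne.mpr h
      simp only [pvRleAux, hb, Bool.false_eq_true, if_false]
      refine ⟨?_, ?_, ?_⟩
      · simp only [List.map_cons]
        refine List.pairwise_cons.mpr ⟨?_, hIH.1⟩
        intro a ha
        rcases (hIH.2.1 a).mp ha with rfl | ha
        · exact hvw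
        · exact hvlt a (List.mem_cons_of_mem _ ha)
      · intro a
        simp only [List.map_cons, List.mem_cons]
        rw [hIH.2.1 a]
      · intro p hp
        have hvnot : v ∉ w :: t := fun hmem => lt_irrefl v (hvlt v hmem)
        rcases List.mem_cons.mp hp with rfl | hp
        · rw [if_pos rfl]
          rw [PySem.List.count_eq, List.count_eq_zero.mpr hvnot]
          simp
        · have hpmem : p.1 = w ∨ p.1 ∈ t := (hIH.2.1 p.1).mp (List.mem_map_of_mem hp)
          have hvp : v < p.1 := by
            rcases hpmem with h1 | h1
            · exact h1 ▸ hvw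
            · exact hvlt p.1 (List.mem_cons_of_mem _ h1)
          have hpv : ¬ p.1 = v := fun he => lt_irrefl v (he ▸ hvp)
          have hcnt := hIH.2.2 p hp
          simp only [if_neg hpv]
          by_cases hpw : p.1 = w
          · rw [if_pos hpw] at hcnt
            rw [hcnt, hpw, PySem.List.count_eq, PySem.List.count_eq, List.count_cons_self]
            push_cast
            ring
          · simp only [hpw, if_false] at hcnt
            have hne : p.1 ≠ w := fun he => hpw he
            rw [hcnt, PySem.List.count_eq, PySem.List.count_eq, List.count_cons_of_ne hne.symm]

-- a permutation with the same strict "pairwise" shape is an equality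
lemma pv_eq_of_perm {α : Type} (R : α → α → Prop)
    (hasym : ∀ a b, R a b → R b a → False) :
    ∀ l1 l2 : List α, l1.Perm l2 → l1.Pairwise R → l2.Pairwise R → l1 = l2 := by
  intro l1
  induction l1 with
  | nil => intro l2 hp _ _; exact (List.Perm.nil_eq hp).symm ▸ rfl
  | cons a t1 ih =>
    intro l2 hp h1 h2
    cases l2 with
    | nil => exact absurd hp.symm (by simp)
    | cons b t2 =>
      by_cases hab : a = b
      · subst hab
        rw [ih t2 (hp.cons_inv) (List.pairwise_cons.mp h1).2 (List.pairwise_cons.mp h2).2]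
      · have hbmem : b ∈ t1 := by
          have : b ∈ a :: t1 := hp.symm.subset List.mem_cons_self
          rcases List.mem_cons.mp this with h | h
          · exact absurd h.symm hab
          · exact h
        have hamem : a ∈ t2 := by
          have : a ∈ b :: t2 := hp.subset List.mem_cons_self
          rcases List.mem_cons.mp this with h | h
          · exact absurd h hab
          · exact h
        exact absurd ((List.pairwise_cons.mp h2).1 a hamem)
          (fun h => hasym a b ((List.pairwise_cons.mp h1).1 b hbmem) h)

-- the main list-level equality, for the list ws of all words of all phrases
lemma main_sort_eq (ws : List String) :
    (PySem.List.sorted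
        ((PySem.List.sorted (PySem.Set.ofList ws) (fun x => x) false).foldl
          (fun d word => d.insert word ((PySem.List.count ws word : Int))) PySem.Dict.empty).keys
        (fun w => ((PySem.List.sorted (PySem.Set.ofList ws) (fun x => x) false).foldl
          (fun d word => d.insert word ((PySem.List.count ws word : Int)))
          PySem.Dict.empty).getD w 0) true).map (fun i => i)
    = (PySem.List.sorted
        ((PySem.List.sorted ws (fun x => x) false).foldl (fun runs w =>
          match runs.getLast? with
          | some r => if r.1 == w then runs.dropLast ++ [(w, r.2 + 1)] else runs ++ [(w, (1 : Int))]
          | none => runs ++ [(w, (1 : Int))]) ([] : List (String × Int)))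
        (fun r => r.2) true).map (fun r => r.1) := by
  rw [List.map_id']
  set U := PySem.List.sorted (PySem.Set.ofList ws) (fun x => x) false with hU
  have hUperm : U.Perm (PySem.Set.ofList ws) := PySem.List.sorted_perm _ _ _
  have hUnd : U.Nodup := hUperm.nodup_iff.mpr (PySem.Set.nodup_ofList ws)
  have hUlt : U.Pairwise (· < ·) := PySem.List.sorted_ofList_pairwise_lt ws
  -- A's dict
  set dA := U.foldl (fun d word => d.insert word ((PySem.List.count ws word : Int)))
    PySem.Dict.empty with hdA
  have hkA : dA.keys = U := by
    rw [hdA, PySem.Dict.keys_foldl_insert U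
      (fun _ word => ((PySem.List.count ws word : Int))) PySem.Dict.empty]
    show PySem.Set.update ([] : List String) U = U
    rw [PySem.Set.update_eq_append_of_disjoint _ _ hUnd (by simp)]
    simp
  have hvA : ∀ w ∈ U, dA.getD w 0 = (PySem.List.count ws w : Int) := by
    intro w hw
    exact getD_foldl_insert_mem U _ _ w hw
  -- A's sorted list is pairwise "count descending, alphabetical on ties"
  set LA := PySem.List.sorted dA.keys (fun w => dA.getD w 0) true with hLA
  have hApw : LA.Pairwise (pvRel (fun w => (PySem.List.count ws w : Int)) (· < ·)) := by
    have h1 : LA.Pairwise (pvRel (fun w => dA.getD w 0) (· < ·)) := by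
      rw [hLA, hkA]
      exact sorted_rev_pairwise_rel (fun w => dA.getD w 0) (· < ·) U hUlt
    refine h1.imp_of_mem ?_
    intro a b ha hb h
    rw [hLA, PySem.List.mem_sorted, hkA] at ha hb
    rw [pvRel] at h ⊢
    rw [hvA a ha, hvA b hb] at h
    exact h
  -- B's words and runs
  set words := PySem.List.sorted ws (fun x => x) false with hwords
  have hwperm : words.Perm ws := PySem.List.sorted_perm _ _ _
  have hwsorted : words.Pairwise (· ≤ ·) := PySem.List.sorted_pairwise ws (fun x => x)
  set step := (fun (runs : List (String × Int)) (w : String) =>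
      match runs.getLast? with
      | some r => if r.1 == w then runs.dropLast ++ [(w, r.2 + 1)] else runs ++ [(w, (1 : Int))]
      | none => runs ++ [(w, (1 : Int))]) with hstep
  cases hw : words with
  | nil =>
    have hws : ws = [] := by
      have := hwperm
      rw [hw] at this
      exact this.symm.eq_nil
    subst hws
    have hUnil : U = [] := by rw [hU]; rfl
    rw [hLA, hkA, hUnil]
    rfl
  | cons w t =>
    have hruns : List.foldl step [] (w :: t) = pvRleAux w 1 t := by
      rw [List.foldl_cons]
      have h0 : step [] w = [] ++ [(w, (1 : Int))] := by rw [hstep]; rfl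
      rw [h0, hstep]
      exact foldRuns t [] w 1
    rw [hruns]
    have htsorted : t.Pairwise (· ≤ ·) := by
      have := hwsorted; rw [hw] at this; exact (List.pairwise_cons.mp this).2
    have hwt : ∀ x ∈ t, w ≤ x := by
      have := hwsorted; rw [hw] at this; exact (List.pairwise_cons.mp this).1
    have hspec := rleAux_spec t w 1 htsorted hwt
    -- counts stored in the runs are the counts in ws
    have hcount : ∀ p ∈ pvRleAux w 1 t, p.2 = (PySem.List.count ws p.1 : Int) := by
      intro p hp
      have h1 := hspec.2.2 p hp
      have hcw : PySem.List.count ws p.1 = PySem.List.count (w :: t) p.1 := by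
        rw [PySem.List.count_eq, PySem.List.count_eq]
        exact ((hw ▸ hwperm).symm.count_eq p.1)
      rw [hcw]
      by_cases hpw : p.1 = w
      · rw [if_pos hpw] at h1
        rw [h1, hpw, PySem.List.count_eq, PySem.List.count_eq, List.count_cons_self]
        push_cast
        ring
      · rw [if_neg hpw] at h1
        have hne : p.1 ≠ w := hpw
        rw [h1, PySem.List.count_eq, PySem.List.count_eq, List.count_cons_of_ne hne.symm]
    -- runs' words are strictly increasing and enumerate exactly set(ws)
    have hrfst : ((pvRleAux w 1 t).map Prod.fst).Pairwise (· < ·) := hspec.1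
    have hrpw : (pvRleAux w 1 t).Pairwise (fun p q => p.1 < q.1) := (List.pairwise_map).mp hrfst
    have hrmem : ∀ a, a ∈ (pvRleAux w 1 t).map Prod.fst ↔ a ∈ ws := by
      intro a
      rw [hspec.2.1 a]
      constructor
      · rintro (rfl | ha)
        · exact (hw ▸ hwperm).subset List.mem_cons_self
        · exact (hw ▸ hwperm).subset (List.mem_cons_of_mem _ ha)
      · intro ha
        have : a ∈ w :: t := (hw ▸ hwperm).symm.subset ha
        rcases List.mem_cons.mp this with rfl | h
        · exact Or.inl rfl
        · exact Or.inr h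
    -- B's sorted runs are pairwise the same order, via the stored counts
    have hBpw' : (PySem.List.sorted (pvRleAux w 1 t) (fun r => r.2) true).Pairwise
        (pvRel (fun (r : String × Int) => r.2) (fun p q => p.1 < q.1)) :=
      sorted_rev_pairwise_rel (fun (r : String × Int) => r.2)
        (fun (p q : String × Int) => p.1 < q.1) (pvRleAux w 1 t) hrpw
    have hBpw : ((PySem.List.sorted (pvRleAux w 1 t) (fun r => r.2) true).map
        (fun r => r.1)).Pairwise
        (pvRel (fun w => (PySem.List.count ws w : Int)) (· < ·)) := by
      rw [List.pairwise_map]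
      refine hBpw'.imp_of_mem ?_
      intro a b ha hb h
      rw [PySem.List.mem_sorted] at ha hb
      rw [pvRel] at h ⊢
      rw [hcount a ha, hcount b hb] at h
      exact h
    -- the two lists are permutations of each other
    have hperm : LA.Perm ((PySem.List.sorted (pvRleAux w 1 t) (fun r => r.2) true).map
        (fun r => r.1)) := by
      have h1 : LA.Perm U := hkA ▸ PySem.List.sorted_perm _ _ _
      have h2 : ((PySem.List.sorted (pvRleAux w 1 t) (fun r => r.2) true).map
          (fun r => r.1)).Perm ((pvRleAux w 1 t).map Prod.fst) :=
        (PySem.List.sorted_perm _ _ _).map Prod.fst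
      have hnd1 : ((pvRleAux w 1 t).map Prod.fst).Nodup := hrfst.imp (fun h => ne_of_lt h)
      have h3 : ((pvRleAux w 1 t).map Prod.fst).Perm (PySem.Set.ofList ws) := by
        rw [List.perm_ext_iff_of_nodup hnd1 (PySem.Set.nodup_ofList ws)]
        intro a
        rw [hrmem a, PySem.Set.mem_ofList]
      exact ((h1.trans hUperm).trans h3.symm).trans h2.symm
    -- pvRel is asymmetric, so the pairwise-sorted permutation is an equality
    refine pv_eq_of_perm _ ?_ LA _ hperm hApw hBpw
    intro a b hab hba
    rcases hab with h | ⟨h1, h2⟩ <;> rcases hba with h' | ⟨h1', h2'⟩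
    · omega
    · omega
    · omega
    · exact lt_asymm h2 h2'

-- ===== VERDICT (by name: the statement is the Claim_ definition above) =====
theorem get_group_name_spec : Claim_equal_get_group_name := by
  intro gp _
  unfold Spec_get_group_name get_group_name get_group_name_alt
  rw [PySem.List.foldl_append_eq_flatMap]
  simp only [List.nil_append]
  exact congrArg (PySem.Str.join " ")
    (main_sort_eq (gp.flatMap (fun phrase => (PySem.Str.split? phrase " ").getD [])))
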